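-- pv_equiv track=rewrite | github.com/wesleyphin/JULIE | de3_distance_utils.py | normalize_distance_mode
-- ===== SOURCE A (Python) =====
-- from typing import Any, Optional
--
-- DISTANCE_MODE_POINTS = "points"
--
-- DISTANCE_MODE_PERCENT_OF_ENTRY = "percent_of_entry"
--
-- DEFAULT_DISTANCE_MODE = DISTANCE_MODE_POINTS
--
-- def normalize_distance_mode(value: Any, default: str = DEFAULT_DISTANCE_MODE) -> str:
--     text = str(value or "").strip().lower()
--     if not text:
--         text = str(default or DEFAULT_DISTANCE_MODE).strip().lower()
--     if text in {"points", "point", "pts", "absolute", "fixed_points"}: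
--         return DISTANCE_MODE_POINTS
--     if text in {
--         "percent_of_entry",
--         "percent",
--         "pct",
--         "pct_of_entry",
--         "percent_move",
--         "pct_move",
--         "entry_percent",
--     }:
--         return DISTANCE_MODE_PERCENT_OF_ENTRY
--     return normalize_distance_mode(default, DEFAULT_DISTANCE_MODE) if text != str(default).strip().lower() else DISTANCE_MODE_POINTS
-- ===== SOURCE B (Python) =====
-- DISTANCE_MODE_POINTS = "points"
-- DISTANCE_MODE_PERCENT_OF_ENTRY = "percent_of_entry"
-- DEFAULT_DISTANCE_MODE = DISTANCE_MODE_POINTS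
--
-- _ALIASES = {
--     "points": DISTANCE_MODE_POINTS,
--     "point": DISTANCE_MODE_POINTS,
--     "pts": DISTANCE_MODE_POINTS,
--     "absolute": DISTANCE_MODE_POINTS,
--     "fixed_points": DISTANCE_MODE_POINTS,
--     "percent_of_entry": DISTANCE_MODE_PERCENT_OF_ENTRY,
--     "percent": DISTANCE_MODE_PERCENT_OF_ENTRY,
--     "pct": DISTANCE_MODE_PERCENT_OF_ENTRY,
--     "pct_of_entry": DISTANCE_MODE_PERCENT_OF_ENTRY,
--     "percent_move": DISTANCE_MODE_PERCENT_OF_ENTRY,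
--     "pct_move": DISTANCE_MODE_PERCENT_OF_ENTRY,
--     "entry_percent": DISTANCE_MODE_PERCENT_OF_ENTRY,
-- }
--
--
-- def _first_canonical(candidates):
--     """Canonical mode of the first recognized candidate; 'points' if none match."""
--     for cand in candidates:
--         canon = _ALIASES.get(cand)
--         if canon is not None:
--             return canon
--     return DISTANCE_MODE_POINTS
--
--
-- def normalize_distance_mode(value, default=DEFAULT_DISTANCE_MODE):
--     # Fallback chain: the value, then the default, then the global fallback 'points'.
--     # No empty-text substitution and no recursion: an empty or unrecognized
--     # candidate simply never matches and the chain falls through.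
--     return _first_canonical([
--         str(value or "").strip().lower(),
--         str(default or "").strip().lower(),
--     ])
-- ===== Notes on version B (the rewrite author's own statement) =====
-- stated objective: simpler
-- what changed: A substitutes the normalized default for an empty text and, on an unrecognized text, recurses into itself (depth up to 2) with a guard comparing the text against the normalized default; B is a single linear fallback-chain scan: it builds the candidate list [normalized value, normalized default], returns the canonical mode of the first candidate found in one alias table, and 'points' when none matches -- no empty-text substitution, no recursion, no guard.
import Mathlib
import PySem

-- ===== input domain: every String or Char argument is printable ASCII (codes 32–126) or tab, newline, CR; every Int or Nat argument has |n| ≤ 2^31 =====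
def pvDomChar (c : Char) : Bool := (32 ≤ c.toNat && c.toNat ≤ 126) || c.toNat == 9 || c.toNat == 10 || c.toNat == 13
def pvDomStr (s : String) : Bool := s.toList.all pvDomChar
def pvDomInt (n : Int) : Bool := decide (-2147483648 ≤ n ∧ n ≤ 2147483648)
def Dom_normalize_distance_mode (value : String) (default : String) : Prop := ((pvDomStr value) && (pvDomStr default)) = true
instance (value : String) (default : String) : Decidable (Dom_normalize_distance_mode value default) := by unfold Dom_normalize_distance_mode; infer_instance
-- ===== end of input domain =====

set_option maxHeartbeats 1600000

-- B replaces A's empty-text substitution + bounded recursion by a single linear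
-- fallback-chain scan ([value, default], canonical of first recognized, else "points").

-- ===== PORT A =====
-- A's self-recursion (its depth never exceeds 3) is transcribed with a fuel
-- counter purely to make the recursion structural; fuel 3 is never exhausted.
def nmGo : Nat → String → String → String
  | 0, _, _ => "points"
  | Nat.succ fuel, value, default =>
    let text0 := PySem.Str.lower (PySem.Str.strip (if value == "" then "" else value))
    let text := if text0 == "" then PySem.Str.lower (PySem.Str.strip (if default == "" then "points" else default)) else text0
    if text ∈ ["points", "point", "pts", "absolute", "fixed_points"] then "points"
    else if text ∈ ["percent_of_entry", "percent", "pct", "pct_of_entry", "percent_move", "pct_move", "entry_percent"] then "percent_of_entry"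
    else if text ≠ PySem.Str.lower (PySem.Str.strip default) then nmGo fuel default "points"
    else "points"

def normalize_distance_mode (value : String) (default : String) : String :=
  nmGo 3 value default

-- ===== PORT B =====
def pvAliases : PySem.Dict String String := PySem.Dict.ofList
  [("points", "points"), ("point", "points"), ("pts", "points"), ("absolute", "points"),
   ("fixed_points", "points"),
   ("percent_of_entry", "percent_of_entry"), ("percent", "percent_of_entry"),
   ("pct", "percent_of_entry"), ("pct_of_entry", "percent_of_entry"),
   ("percent_move", "percent_of_entry"), ("pct_move", "percent_of_entry"),
   ("entry_percent", "percent_of_entry")]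

-- _first_canonical: canonical mode of the first recognized candidate, else "points"
def firstCanonical : List String → String
  | [] => "points"
  | cand :: rest =>
    match pvAliases.get? cand with
    | some canon => canon
    | none => firstCanonical rest

def normalize_distance_mode_alt (value : String) (default : String) : String :=
  firstCanonical
    [PySem.Str.lower (PySem.Str.strip (if value == "" then "" else value)),
     PySem.Str.lower (PySem.Str.strip (if default == "" then "" else default))]

-- ===== PRECONDITION & SPEC =====
def Spec_normalize_distance_mode (value : String) (default : String) (out : String) : Prop := out = normalize_distance_mode_alt value default
instance (value : String) (default : String) (out : String) : Decidable (Spec_normalize_distance_mode value default out) := by unfold Spec_normalize_distance_mode; infer_instance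

-- ===== CLAIM (what is proved, stated in full; the proofs are below) =====
def Claim_equal_normalize_distance_mode : Prop := ∀ (value : String) (default : String), Dom_normalize_distance_mode value default → Spec_normalize_distance_mode value default (normalize_distance_mode value default)

-- ===== LEMMAS AND PROOFS =====

lemma if_empty_self (d : String) : (if d == "" then "" else d) = d := by
  by_cases h : d = "" <;> simp [h]

lemma lower_strip_points : PySem.Str.lower (PySem.Str.strip "points") = "points" := by decide

lemma nmGo_succ (fuel : Nat) (value default : String) :
    nmGo (fuel + 1) value default =
      (let text0 := PySem.Str.lower (PySem.Str.strip (if value == "" then "" else value))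
       let text := if text0 == "" then PySem.Str.lower (PySem.Str.strip (if default == "" then "points" else default)) else text0
       if text ∈ ["points", "point", "pts", "absolute", "fixed_points"] then "points"
       else if text ∈ ["percent_of_entry", "percent", "pct", "pct_of_entry", "percent_move", "pct_move", "entry_percent"] then "percent_of_entry"
       else if text ≠ PySem.Str.lower (PySem.Str.strip default) then nmGo fuel default "points"
       else "points") := rfl

lemma get_aliases (t : String) :
    pvAliases.get? t =
      if t ∈ ["points", "point", "pts", "absolute", "fixed_points"] then some "points"
      else if t ∈ ["percent_of_entry", "percent", "pct", "pct_of_entry", "percent_move", "pct_move", "entry_percent"] then some "percent_of_entry"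
      else none := by
  by_cases m1 : t ∈ ["points", "point", "pts", "absolute", "fixed_points"]
  · rw [if_pos m1]; fin_cases m1 <;> decide
  · rw [if_neg m1]
    by_cases m2 : t ∈ ["percent_of_entry", "percent", "pct", "pct_of_entry", "percent_move", "pct_move", "entry_percent"]
    · rw [if_pos m2]; fin_cases m2 <;> decide
    · rw [if_neg m2]
      simp only [List.mem_cons, List.not_mem_nil, not_or, or_false] at m1 m2
      obtain ⟨n1, n2, n3, n4, n5⟩ := m1
      obtain ⟨p1, p2, p3, p4, p5, p6, p7⟩ := m2
      simp [pvAliases, PySem.Dict.ofList, PySem.Dict.update, List.foldl,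
        PySem.Dict.get?_insert, PySem.Dict.get?_empty, n1, n2, n3, n4, n5, p1, p2, p3, p4, p5, p6, p7]

lemma alt_eq (value default : String) :
    normalize_distance_mode_alt value default =
      match pvAliases.get? (PySem.Str.lower (PySem.Str.strip value)) with
      | some c => c
      | none => (pvAliases.get? (PySem.Str.lower (PySem.Str.strip default))).getD "points" := by
  simp only [normalize_distance_mode_alt, firstCanonical, if_empty_self]
  cases pvAliases.get? (PySem.Str.lower (PySem.Str.strip value)) with
  | some c => rfl
  | none => cases pvAliases.get? (PySem.Str.lower (PySem.Str.strip default)) <;> rfl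

lemma A_pp (fuel : Nat) : nmGo (fuel + 1) "points" "points" = "points" := by
  rw [nmGo_succ]
  simp [lower_strip_points]

lemma A_points (fuel : Nat) (d : String) :
    nmGo ((fuel + 1) + 1) d "points" =
      (pvAliases.get? (PySem.Str.lower (PySem.Str.strip d))).getD "points" := by
  rw [nmGo_succ]
  simp only [if_empty_self]
  by_cases h0 : PySem.Str.lower (PySem.Str.strip d) = ""
  · rw [h0]
    simp [lower_strip_points, get_aliases]
  · simp only [beq_iff_eq, if_neg h0]
    cases hg : pvAliases.get? (PySem.Str.lower (PySem.Str.strip d)) with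
    | some c =>
      rw [get_aliases] at hg
      split_ifs at hg with h1 h2
      · obtain rfl := Option.some.inj hg
        rw [if_pos h1]
        rfl
      · obtain rfl := Option.some.inj hg
        rw [if_neg h1, if_pos h2]
        rfl
    | none =>
      rw [get_aliases] at hg
      split_ifs at hg with h1 h2
      rw [if_neg h1, if_neg h2, lower_strip_points]
      by_cases ht : PySem.Str.lower (PySem.Str.strip d) = "points"
      · rw [if_neg (not_not_intro ht)]
        rfl
      · rw [if_pos ht, A_pp]
        rfl

theorem main_eq (value default : String) :
    normalize_distance_mode value default = normalize_distance_mode_alt value default := by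
  rw [alt_eq]
  show nmGo (2 + 1) value default = _
  rw [nmGo_succ]
  simp only [if_empty_self]
  by_cases h0 : PySem.Str.lower (PySem.Str.strip value) = ""
  · have hg0 : pvAliases.get? (PySem.Str.lower (PySem.Str.strip value)) = none := by
      rw [h0]; decide
    rw [hg0, h0, if_pos (show (("" : String) == "") = true from rfl)]
    by_cases hd : default = ""
    · rw [hd]
      decide
    · have htD : (if (default == "") = true then "points" else default) = default := by
        simp [hd]
      rw [htD]
      cases hg : pvAliases.get? (PySem.Str.lower (PySem.Str.strip default)) with
      | some c =>
        rw [get_aliases] at hg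
        split_ifs at hg with h1 h2
        · obtain rfl := Option.some.inj hg
          rw [if_pos h1]
          rfl
        · obtain rfl := Option.some.inj hg
          rw [if_neg h1, if_pos h2]
          rfl
      | none =>
        rw [get_aliases] at hg
        split_ifs at hg with h1 h2
        rw [if_neg h1, if_neg h2, if_neg (not_not_intro rfl)]
        rfl
  · simp only [beq_iff_eq, if_neg h0]
    cases hg : pvAliases.get? (PySem.Str.lower (PySem.Str.strip value)) with
    | some c =>
      rw [get_aliases] at hg
      split_ifs at hg with h1 h2
      · obtain rfl := Option.some.inj hg
        rw [if_pos h1]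
      · obtain rfl := Option.some.inj hg
        rw [if_neg h1, if_pos h2]
    | none =>
      have hg2 := hg
      rw [get_aliases] at hg
      split_ifs at hg with h1 h2
      rw [if_neg h1, if_neg h2]
      by_cases heq : PySem.Str.lower (PySem.Str.strip value) = PySem.Str.lower (PySem.Str.strip default)
      · rw [if_neg (not_not_intro heq), ← heq, hg2]
        rfl
      · rw [if_pos heq]
        exact A_points 0 default

-- ===== VERDICT (by name: the statement is the Claim_ definition above) =====
theorem normalize_distance_mode_spec : Claim_equal_normalize_distance_mode := by
  intro value default _
  exact main_eq value default
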